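-- pv_equiv track=rewrite | github.com/priyasundaresan/openpi | examples/libero/convert_libero_data_to_aug_lerobot.py | chunk_and_tile_labels
-- ===== SOURCE A (Python) =====
-- from typing import Dict, List
--
-- CHUNK_SIZE = 10  # Tile size for paraphrased instructions
--
-- def chunk_and_tile_labels(n_steps: int, ep_json: dict, chunk_size: int = CHUNK_SIZE) -> List[str]:
--     """
--     Tile paraphrased instructions across chunks of size chunk_size,
--     then truncate to exactly n_steps.
--     """
--     motion_labels = []
--
--     # Number of chunks in this episode
--     num_chunks = (n_steps + chunk_size - 1) // chunk_size
--
--     for chunk_idx in range(num_chunks):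
--         # JSON key for chunk
--         chunk_key = f"step_{chunk_idx}"  # Each chunk in JSON is "step_0", "step_1", etc.
--         chunk_json = ep_json.get(chunk_key, {})
--         label = chunk_json.get("paraphrased", "")
--
--         # Tile label across chunk_size steps
--         motion_labels.extend([label] * chunk_size)
--
--     # Truncate to match exactly n_steps
--     motion_labels = motion_labels[:n_steps]
--     return motion_labels
-- ===== SOURCE B (Python) =====
-- CHUNK_SIZE = 10  # Tile size for paraphrased instructions
--
-- def chunk_and_tile_labels(n_steps, ep_json, chunk_size=CHUNK_SIZE):
--     # Map each output step directly to its chunk via integer division: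
--     # no block building, no final truncation.
--     return [
--         ep_json.get(f"step_{i // chunk_size}", {}).get("paraphrased", "")
--         for i in range(n_steps)
--     ]
-- ===== Notes on version B (the rewrite author's own statement) =====
-- stated objective: simpler
-- what changed: B replaces A's two-phase build (concatenate a full chunk_size-block per chunk, then truncate to n_steps) by a single comprehension over output positions that fetches the label of chunk i // chunk_size directly, with no block building and no truncation.
-- outside the precondition, e.g. on chunk_and_tile_labels(5, {}, -2): A returns [], B returns ['', '', '', '', '']
import Mathlib
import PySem

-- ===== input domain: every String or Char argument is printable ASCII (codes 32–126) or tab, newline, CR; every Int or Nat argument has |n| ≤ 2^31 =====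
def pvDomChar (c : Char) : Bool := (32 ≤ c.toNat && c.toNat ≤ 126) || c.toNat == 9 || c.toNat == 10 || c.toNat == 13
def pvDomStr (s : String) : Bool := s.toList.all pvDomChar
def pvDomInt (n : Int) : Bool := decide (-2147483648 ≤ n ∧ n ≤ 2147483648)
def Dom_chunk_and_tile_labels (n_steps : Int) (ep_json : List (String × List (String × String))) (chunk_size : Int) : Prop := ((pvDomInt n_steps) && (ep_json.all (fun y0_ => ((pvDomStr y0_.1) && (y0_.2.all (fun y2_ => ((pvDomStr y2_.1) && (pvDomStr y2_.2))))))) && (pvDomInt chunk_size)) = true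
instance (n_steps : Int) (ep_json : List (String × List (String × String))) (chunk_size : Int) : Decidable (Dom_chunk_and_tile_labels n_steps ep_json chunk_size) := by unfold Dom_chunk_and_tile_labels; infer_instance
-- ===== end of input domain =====

-- B replaces A's build-chunk-blocks-then-truncate loop by a direct map over output
-- positions (each step i gets the label of chunk i // chunk_size): simpler, no speed claim.

-- ===== PORT A =====
def chunk_and_tile_labels (n_steps : Int) (ep_json : List (String × List (String × String))) (chunk_size : Int) : List String :=
  let num_chunks := PySem.Int.floordiv (n_steps + chunk_size - 1) chunk_size
  let motion_labels := (PySem.List.pyRange 0 num_chunks 1).foldl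
    (fun motion_labels chunk_idx =>
      let chunk_key := "step_" ++ PySem.Int.toStr chunk_idx
      let chunk_json := (PySem.Dict.mk ep_json).getD chunk_key []
      let label := (PySem.Dict.mk chunk_json).getD "paraphrased" ""
      motion_labels ++ PySem.List.pyRepeat [label] chunk_size) []
  PySem.List.slice motion_labels none (some n_steps)

-- ===== PORT B =====
def chunk_and_tile_labels_alt (n_steps : Int) (ep_json : List (String × List (String × String))) (chunk_size : Int) : List String :=
  (PySem.List.pyRange 0 n_steps 1).map (fun i =>
    (PySem.Dict.mk ((PySem.Dict.mk ep_json).getD ("step_" ++ PySem.Int.toStr (PySem.Int.floordiv i chunk_size)) [])).getD "paraphrased" "")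

-- ===== PRECONDITION & SPEC =====
-- Pre_ restricts to positive chunk_size, the natural domain of this tiling function:
-- chunk_size = 0 makes A raise ZeroDivisionError, and a negative chunk size is meaningless
-- (there A returns [] while B labels each of the n_steps steps; neither value is specified).
def Pre_chunk_and_tile_labels (n_steps : Int) (ep_json : List (String × List (String × String))) (chunk_size : Int) : Prop :=
  1 ≤ chunk_size
instance (n_steps : Int) (ep_json : List (String × List (String × String))) (chunk_size : Int) : Decidable (Pre_chunk_and_tile_labels n_steps ep_json chunk_size) := by unfold Pre_chunk_and_tile_labels; infer_instance

def pvWitness_chunk_and_tile_labels : Int × (List (String × List (String × String))) × Int :=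
  (5, [("step_0", [("paraphrased", "pick up the bowl")]), ("step_1", [])], 2)

def Spec_chunk_and_tile_labels (n_steps : Int) (ep_json : List (String × List (String × String))) (chunk_size : Int) (out : List String) : Prop := out = chunk_and_tile_labels_alt n_steps ep_json chunk_size
instance (n_steps : Int) (ep_json : List (String × List (String × String))) (chunk_size : Int) (out : List String) : Decidable (Spec_chunk_and_tile_labels n_steps ep_json chunk_size out) := by unfold Spec_chunk_and_tile_labels; infer_instance

-- ===== CLAIM (what is proved, stated in full; the proofs are below) =====
def Claim_equal_chunk_and_tile_labels : Prop := ∀ (n_steps : Int) (ep_json : List (String × List (String × String))) (chunk_size : Int), Dom_chunk_and_tile_labels n_steps ep_json chunk_size → Pre_chunk_and_tile_labels n_steps ep_json chunk_size → Spec_chunk_and_tile_labels n_steps ep_json chunk_size (chunk_and_tile_labels n_steps ep_json chunk_size)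


-- ===== LEMMAS AND PROOFS =====

-- flattening M chunk blocks of size C is indexing by k / C over M*C positions
lemma pvFlatMap_replicate_range {α : Type} (g : Nat → α) (M C : Nat) :
    (List.range M).flatMap (fun k => List.replicate C (g k))
      = (List.range (M * C)).map (fun k => g (k / C)) := by
  induction M with
  | zero => simp
  | succ M ih =>
    rw [List.range_succ, List.flatMap_append, ih, Nat.succ_mul, List.range_add, List.map_append]
    simp only [List.flatMap_cons, List.flatMap_nil, List.append_nil, Function.comp_def,
      List.map_map]
    congr 1
    symm
    calc (List.range C).map (fun k => g ((M * C + k) / C))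
        = (List.range C).map (fun _ => g M) := by
          refine List.map_congr_left (fun k hk => ?_)
          have hk' : k < C := List.mem_range.mp hk
          have hC : 0 < C := by omega
          congr 1
          rw [Nat.add_comm, Nat.add_mul_div_right _ _ hC, Nat.div_eq_of_lt hk']
          omega
      _ = List.replicate C (g M) := by simp [List.map_const']

-- truncating the flattened ceil(N/C) blocks to N positions is the direct map
lemma pvTake_flatMap_replicate {α : Type} (g : Nat → α) (N C : Nat) (hC : 0 < C) :
    List.take N ((List.range ((N + C - 1) / C)).flatMap (fun k => List.replicate C (g k)))
      = (List.range N).map (fun k => g (k / C)) := by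
  rw [pvFlatMap_replicate_range]
  have hle : N ≤ ((N + C - 1) / C) * C := by
    have h1 := Nat.div_add_mod (N + C - 1) C
    have h2 := Nat.mod_lt (N + C - 1) hC
    set q := (N + C - 1) / C with hq
    set r := (N + C - 1) % C with hr
    have h3 : C * q + r = N + C - 1 := h1
    have h4 : q * C = C * q := Nat.mul_comm q C
    omega
  rw [← List.map_take, List.take_range, Nat.min_eq_left hle]

-- ===== VERDICT (by name: the statement is the Claim_ definition above) =====
theorem chunk_and_tile_labels_spec : Claim_equal_chunk_and_tile_labels := by
  intro n ep cs _ hpre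
  unfold Pre_chunk_and_tile_labels at hpre
  unfold Spec_chunk_and_tile_labels
  simp only [chunk_and_tile_labels, chunk_and_tile_labels_alt]
  rw [PySem.List.foldl_append_eq_flatMap]
  simp only [List.nil_append]
  by_cases hn : n ≤ 0
  · have h1 : PySem.Int.floordiv (n + cs - 1) cs < 1 := by
      rw [PySem.Int.floordiv_lt_iff_lt_mul (show (0:Int) < cs by omega)]; omega
    rw [PySem.List.pyRange_one_eq_nil (by omega : n ≤ (0:Int)),
        PySem.List.pyRange_one_eq_nil (by omega : PySem.Int.floordiv (n + cs - 1) cs ≤ (0:Int))]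
    simp [PySem.List.slice]
  · -- positive number of steps: pass to Nat and use the take/flatMap lemma
    obtain ⟨N, hN⟩ : ∃ N : Nat, n = (N : Int) := ⟨n.toNat, by omega⟩
    obtain ⟨C, hC⟩ : ∃ C : Nat, cs = (C : Int) := ⟨cs.toNat, by omega⟩
    have hCpos : 0 < C := by omega
    have hnum : n + cs - 1 = ((N + C - 1 : Nat) : Int) := by omega
    subst hN hC
    rw [hnum, PySem.Int.floordiv_natCast, PySem.List.slice_to_natCast,
        PySem.List.pyRange_zero_natCast, PySem.List.pyRange_zero_natCast]
    simp only [List.flatMap_map, List.map_map, Function.comp_def,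
      PySem.List.pyRepeat_singleton, Int.toNat_natCast, PySem.Int.floordiv_natCast]
    exact pvTake_flatMap_replicate _ N C hCpos
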